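-- pv_equiv track=rewrite | github.com/tusharkoley/Project_euler | Euler34.py | get_dgt_from_nbr
-- ===== SOURCE A (Python) =====
-- def get_dgt_from_nbr(num):
--     lst = []
--     while num>=10:
--         d = num%10
--         lst.append(d)
--         num = num//10
--
--     lst.append(num)
--     return lst[::-1]
-- ===== SOURCE B (Python) =====
-- def get_dgt_from_nbr(num):
--     if num < 10:
--         return [num]
--     p = 1
--     while num // p >= 10:
--         p *= 10
--     out = []
--     while p >= 1:
--         out.append(num // p)
--         num = num % p
--         p = p // 10
--     return out
-- ===== Notes on version B (the rewrite author's own statement) =====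
-- stated objective: alternative
-- what changed: B extracts digits most-significant-first by first finding the largest power of ten not exceeding num and then peeling the leading digit with //p and %p, instead of A's least-significant-first divide/mod accumulation followed by a list reversal.
import Mathlib
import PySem

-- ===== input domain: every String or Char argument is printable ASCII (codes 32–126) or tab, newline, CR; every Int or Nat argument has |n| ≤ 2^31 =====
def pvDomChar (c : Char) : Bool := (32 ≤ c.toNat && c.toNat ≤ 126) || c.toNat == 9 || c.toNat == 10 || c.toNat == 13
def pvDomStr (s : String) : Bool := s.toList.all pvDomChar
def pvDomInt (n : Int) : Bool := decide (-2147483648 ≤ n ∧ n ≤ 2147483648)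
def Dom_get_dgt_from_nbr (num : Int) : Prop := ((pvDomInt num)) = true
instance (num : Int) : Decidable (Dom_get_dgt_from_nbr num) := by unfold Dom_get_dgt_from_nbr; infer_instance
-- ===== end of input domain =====

-- B extracts digits most-significant-first via the largest power of ten, instead of
-- A's least-significant-first divide/mod loop followed by a reverse (objective: alternative).
-- ===== PORT A =====
def pvLoopA (num : Int) (lst : List Int) : List Int :=
  if _h : num ≥ 10 then
    pvLoopA (PySem.Int.floordiv num 10) (lst ++ [PySem.Int.mod num 10])
  else
    lst ++ [num]
termination_by num.toNat
decreasing_by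
  have h1 : PySem.Int.floordiv num 10 = num / 10 :=
    PySem.Int.floordiv_eq_ediv_of_pos (by omega)
  have h2 : num / 10 < num := by omega
  omega

def get_dgt_from_nbr (num : Int) : List Int :=
  (pvLoopA num []).reverse

-- ===== PORT B =====
-- first while loop of Source B: grow p by tens while num // p >= 10.
-- fuel only makes this very loop structurally total; it is called with
-- fuel = num.toNat + 1, far more iterations than the loop can ever take.
def pvFindPow (fuel : Nat) (num p : Int) : Int :=
  match fuel with
  | 0 => p
  | f + 1 =>
      if 10 ≤ PySem.Int.floordiv num p then pvFindPow f num (p * 10) else p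

-- second while loop of Source B: peel the leading digit with //p and %p.
def pvPeel (num p : Int) (out : List Int) : List Int :=
  if _h : 1 ≤ p then
    pvPeel (PySem.Int.mod num p) (PySem.Int.floordiv p 10) (out ++ [PySem.Int.floordiv num p])
  else
    out
termination_by p.toNat
decreasing_by
  have h1 : PySem.Int.floordiv p 10 = p / 10 :=
    PySem.Int.floordiv_eq_ediv_of_pos (by omega)
  have h2 : p / 10 < p := by omega
  omega

def get_dgt_from_nbr_alt (num : Int) : List Int :=
  if num < 10 then [num]
  else
    let p := pvFindPow (num.toNat + 1) num 1
    pvPeel num p []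

-- ===== PRECONDITION & SPEC =====
def Spec_get_dgt_from_nbr (num : Int) (out : List Int) : Prop := out = get_dgt_from_nbr_alt num
instance (num : Int) (out : List Int) : Decidable (Spec_get_dgt_from_nbr num out) := by unfold Spec_get_dgt_from_nbr; infer_instance

-- ===== CLAIM (what is proved, stated in full; the proofs are below) =====
def Claim_equal_get_dgt_from_nbr : Prop := ∀ (num : Int), Dom_get_dgt_from_nbr num → Spec_get_dgt_from_nbr num (get_dgt_from_nbr num)

-- ===== LEMMAS AND PROOFS =====

-- A's loop produces the little-endian base-10 digits (with [0] for 0).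
theorem pvLoopA_digits (num : Int) (lst : List Int) (h0 : 0 ≤ num) :
    pvLoopA num lst =
      lst ++ (if num = 0 then [0]
              else (Nat.digits 10 num.toNat).map (fun d => (d : Int))) := by
  induction num, lst using pvLoopA.induct with
  | case1 num lst h ih =>
      have hd : PySem.Int.floordiv num 10 = num / 10 :=
        PySem.Int.floordiv_eq_ediv_of_pos (by omega)
    -- digits
      have hm : PySem.Int.mod num 10 = num % 10 :=
        PySem.Int.mod_eq_emod_of_pos (by omega)
      rw [pvLoopA, dif_pos h, ih (by omega), hd, hm]
      have hne : num / 10 ≠ 0 := by omega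
      have hpos : 0 < num.toNat := by omega
      rw [if_neg hne, if_neg (by omega : ¬ num = 0)]
      rw [Nat.digits_def' (by norm_num : (1:Nat) < 10) hpos]
      have e1 : ((num / 10).toNat) = num.toNat / 10 := by omega
      have e2 : (num % 10) = ((num.toNat % 10 : Nat) : Int) := by omega
      simp [e1, e2]
  | case2 num lst h =>
      rw [pvLoopA, dif_neg h]
      by_cases hz : num = 0
      · simp [hz]
      · have hpos : 0 < num.toNat := by omega
        rw [if_neg hz, Nat.digits_def' (by norm_num : (1:Nat) < 10) hpos]
        have : num.toNat / 10 = 0 := by omega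
        rw [this]
        have e2 : ((num.toNat % 10 : Nat) : Int) = num := by omega
        simp [e2]

-- pvFindPow finds a power of ten bracketing num.
theorem pvFindPow_spec (fuel : Nat) : ∀ (j : Nat) (num : Int),
    (10:Int) ^ j ≤ num → num < (10:Int) ^ (j + fuel) →
    ∃ k : Nat, pvFindPow fuel num ((10:Int) ^ j) = (10:Int) ^ k ∧
      (10:Int) ^ k ≤ num ∧ num < (10:Int) ^ (k + 1) := by
  induction fuel with
  | zero =>
      intro j num hj hfu
      simp only [Nat.add_zero] at hfu
      omega
  | succ f ih =>
      intro j num hj hfu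
      have hp : (0:Int) < 10 ^ j := by positivity
      have hguard : (10 ≤ PySem.Int.floordiv num ((10:Int) ^ j)) ↔ (10:Int) ^ (j+1) ≤ num := by
        rw [PySem.Int.le_floordiv_iff_mul_le hp]
        constructor <;> intro hx
        · calc (10:Int)^(j+1) = 10 * 10 ^ j := by ring
            _ ≤ num := hx
        · calc (10:Int) * 10 ^ j = 10 ^ (j+1) := by ring
            _ ≤ num := hx
      by_cases hc : (10:Int) ^ (j+1) ≤ num
      · rw [pvFindPow, if_pos (hguard.mpr hc)]
        have hstep : (10:Int) ^ j * 10 = 10 ^ (j+1) := by ring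
        rw [hstep]
        have hfu' : num < (10:Int) ^ (j + 1 + f) := by
          have e : j + 1 + f = j + (f+1) := by omega
          rw [e]; exact hfu
        exact ih (j+1) num hc hfu'
      · rw [pvFindPow, if_neg (fun hx => hc (hguard.mp hx))]
        exact ⟨j, rfl, hj, by omega⟩

-- pvPeel from power 10^k yields the zero-padded big-endian digits.
theorem pvPeel_digits (k : Nat) : ∀ (num : Int) (out : List Int),
    0 ≤ num → num < (10:Int) ^ (k + 1) →
    pvPeel num ((10:Int) ^ k) out =
      out ++ List.replicate (k + 1 - (Nat.digits 10 num.toNat).length) 0 ++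
        ((Nat.digits 10 num.toNat).map (fun d => (d : Int))).reverse := by
  induction k with
  | zero =>
      intro num out h0 hlt
      rw [pvPeel, dif_pos (by norm_num)]
      have e1 : PySem.Int.mod num (10^0) = 0 := by
        rw [PySem.Int.mod_eq_emod_of_pos (by norm_num)]; simp
      have e2 : PySem.Int.floordiv ((10:Int)^0) 10 = 0 := by
        rw [PySem.Int.floordiv_eq_ediv_of_pos (by norm_num)]; norm_num
      have e3 : PySem.Int.floordiv num ((10:Int)^0) = num := by
        rw [PySem.Int.floordiv_eq_ediv_of_pos (by norm_num)]; simp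
      rw [e1, e2, e3, pvPeel, dif_neg (by norm_num)]
      by_cases hz : num = 0
      · simp [hz]
      · have hpos : 0 < num.toNat := by omega
        rw [Nat.digits_def' (by norm_num : (1:Nat) < 10) hpos]
        have h10 : num.toNat / 10 = 0 := by omega
        rw [h10]
        have e4 : ((num.toNat % 10 : Nat) : Int) = num := by omega
        simp [e4]
  | succ k ih =>
      intro num out h0 hlt
      have hp : (0:Int) < 10 ^ (k+1) := by positivity
      rw [pvPeel, dif_pos (one_le_pow₀ (by norm_num))]
      have hdvd : PySem.Int.floordiv ((10:Int)^(k+1)) 10 = 10 ^ k := by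
        rw [PySem.Int.floordiv_eq_ediv_of_pos (by norm_num), pow_succ]
        rw [Int.mul_ediv_cancel _ (by norm_num)]
      have hmod : PySem.Int.mod num ((10:Int)^(k+1)) = num % 10 ^ (k+1) :=
        PySem.Int.mod_eq_emod_of_pos hp
      have hdiv : PySem.Int.floordiv num ((10:Int)^(k+1)) = num / 10 ^ (k+1) :=
        PySem.Int.floordiv_eq_ediv_of_pos hp
      rw [hdvd, hmod, hdiv]
      have hr0 : 0 ≤ num % 10 ^ (k+1) := Int.emod_nonneg _ (by positivity)
      have hrlt : num % 10 ^ (k+1) < 10 ^ (k+1) := Int.emod_lt_of_pos _ hp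
      rw [ih _ _ hr0 hrlt]
      -- now pure digit bookkeeping
      set r : Int := num % 10 ^ (k+1) with hr
      set d : Int := num / 10 ^ (k+1) with hd
      have hd0 : 0 ≤ d := Int.ediv_nonneg h0 (le_of_lt hp)
      have hd10 : d < 10 := by
        rw [hd, Int.ediv_lt_iff_lt_mul hp]
        calc num < 10 ^ (k+1+1) := hlt
          _ = 10 * 10 ^ (k+1) := by ring
      have hInt : (10:Int) ^ (k+1) * d + r = num := Int.mul_ediv_add_emod num _
      have hsplit : num.toNat = r.toNat + 10 ^ (k+1) * d.toNat := by
        have h1 : ((r.toNat + 10 ^ (k+1) * d.toNat : Nat) : Int) = (num.toNat : Int) := by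
          push_cast [Int.toNat_of_nonneg hr0, Int.toNat_of_nonneg hd0, Int.toNat_of_nonneg h0]
          linarith [hInt]
        exact_mod_cast h1.symm
      have hlenr : (Nat.digits 10 r.toNat).length ≤ k + 1 := by
        rw [Nat.digits_length_le_iff (by norm_num)]
        have hc : (r.toNat : Int) < (((10:Nat) ^ (k+1) : Nat) : Int) := by
          push_cast [Int.toNat_of_nonneg hr0]; exact hrlt
        exact_mod_cast hc
      by_cases hdz : d = 0
      · -- leading digit zero: num = r
        have hdt : d.toNat = 0 := by rw [hdz]; rfl
        have hrn : r.toNat = num.toNat := by simp [hsplit, hdt]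
        rw [hdz, hrn]
        have hlen' : (Nat.digits 10 num.toNat).length ≤ k + 1 := by rw [← hrn]; exact hlenr
        have : k + 1 + 1 - (Nat.digits 10 num.toNat).length
             = (k + 1 - (Nat.digits 10 num.toNat).length) + 1 := by omega
        rw [this, List.replicate_succ]
        simp
      · -- leading digit d ≥ 1
        have hdpos : 0 < d := lt_of_le_of_ne hd0 (Ne.symm hdz)
        have hm : 0 < d.toNat := by omega
        have key := Nat.digits_append_zeroes_append_digits
          (b := 10) (k := k + 1 - (Nat.digits 10 r.toNat).length)
          (m := d.toNat) (n := r.toNat) (by norm_num) hm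
        have hexp : (Nat.digits 10 r.toNat).length + (k + 1 - (Nat.digits 10 r.toNat).length)
            = k + 1 := by omega
        rw [hexp, ← hsplit] at key
        have hdigd : Nat.digits 10 d.toNat = [d.toNat] := by
          rw [Nat.digits_def' (by norm_num : (1:Nat) < 10) hm]
          have : d.toNat / 10 = 0 := by omega
          rw [this]
          have : d.toNat % 10 = d.toNat := by omega
          simp [this]
        rw [hdigd] at key
        rw [← key]
        have hlen : (Nat.digits 10 r.toNat ++ List.replicate (k + 1 - (Nat.digits 10 r.toNat).length) 0 ++ [d.toNat]).length = k + 2 := by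
          simp; omega
        rw [hlen]
        have hdc : ((d.toNat : Nat) : Int) = d := by omega
        have hrep : List.flatMap (fun a : Nat => [(↑a : Int)])
            (List.replicate (k + 1 - (Nat.digits 10 r.toNat).length) 0)
            = List.replicate (k + 1 - (Nat.digits 10 r.toNat).length) (0:Int) := by
          induction (k + 1 - (Nat.digits 10 r.toNat).length) with
          | zero => simp
          | succ n ihn => simp [List.replicate_succ, ihn]
        simp [List.flatMap_append, hrep, hdc]

-- ===== VERDICT (by name: the statement is the Claim_ definition above) =====
theorem get_dgt_from_nbr_spec : Claim_equal_get_dgt_from_nbr := by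
  intro num _
  unfold Spec_get_dgt_from_nbr get_dgt_from_nbr get_dgt_from_nbr_alt
  by_cases hlt : num < 10
  · rw [if_pos hlt, pvLoopA, dif_neg (by omega)]
    simp
  · rw [if_neg hlt]
    have h0 : (0:Int) ≤ num := by omega
    have hten : (10:Int) ≤ num := by omega
    -- the power-finding loop lands on the bracketing power of ten
    have hone : (10:Int) ^ 0 ≤ num := by norm_num; omega
    have hbig : num < (10:Int) ^ (0 + (num.toNat + 1)) := by
      have hn : num.toNat < 10 ^ (num.toNat + 1) := by
        calc num.toNat < 2 ^ (num.toNat + 1) := Nat.lt_two_pow_self.trans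
              (Nat.pow_lt_pow_succ (by norm_num))
          _ ≤ 10 ^ (num.toNat + 1) := Nat.pow_le_pow_left (by norm_num) _
      have : (num.toNat : Int) < ((10 ^ (num.toNat + 1) : Nat) : Int) := by exact_mod_cast hn
      rw [Int.toNat_of_nonneg h0] at this
      rw [Nat.zero_add]
      exact this.trans_le (by push_cast; simp)
    obtain ⟨k, hEq, hk1, hk2⟩ := pvFindPow_spec (num.toNat + 1) 0 num hone hbig
    have h1 : (1:Int) = (10:Int) ^ 0 := by norm_num
    rw [h1, hEq, pvPeel_digits k num [] h0 hk2]
    -- the digit count is exactly k + 1, so the zero padding is empty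
    have hlen : (Nat.digits 10 num.toNat).length = k + 1 := by
      have hle : (Nat.digits 10 num.toNat).length ≤ k + 1 := by
        rw [Nat.digits_length_le_iff (by norm_num)]
        have : (num.toNat : Int) < (((10:Nat) ^ (k+1) : Nat) : Int) := by
          push_cast [Int.toNat_of_nonneg h0]; exact hk2
        exact_mod_cast this
      have hgt : ¬ (Nat.digits 10 num.toNat).length ≤ k := by
        rw [Nat.digits_length_le_iff (by norm_num)]
        push Not
        have : (((10:Nat) ^ k : Nat) : Int) ≤ (num.toNat : Int) := by
          push_cast [Int.toNat_of_nonneg h0]; exact hk1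
        exact_mod_cast this
      omega
    rw [hlen]
    simp [pvLoopA_digits num [] h0, if_neg (by omega : ¬ num = 0)]
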